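-- pv_equiv track=rewrite | github.com/roblandry/apex-neptune-home-assistant | custom_components/apex_fusion/sensor.py | pretty_model
-- ===== SOURCE A (Python) =====
-- def pretty_model(s: str) -> str:
--     """Prettify model tokens like 'Nero5' -> 'Nero 5'."""
--     t = (s or "").strip()
--     if not t:
--         return t
--
--     # Split first run of letters from trailing digits.
--     split_at: int | None = None
--     for idx, ch in enumerate(t):
--         if ch.isdigit():
--             split_at = idx
--             break
--
--     if split_at is None or split_at == 0:
--         return t
--
--     prefix = t[:split_at]
--     suffix = t[split_at:]
--     if suffix.isdigit() and prefix.isalpha():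
--         return f"{prefix} {suffix}"
--
--     return t
-- ===== SOURCE B (Python) =====
-- def pretty_model(s: str) -> str:
--     """Prettify model tokens like 'Nero5' -> 'Nero 5'."""
--     t = (s or "").strip()
--     pre, suf = [], []
--     state = 0  # 0: reading letters, 1: reading digits, 2: rejected
--     for ch in t:
--         if state == 0:
--             if ch.isalpha():
--                 pre.append(ch)
--             elif ch.isdigit() and pre:
--                 suf.append(ch)
--                 state = 1
--             else:
--                 state = 2
--                 break
--         else:
--             if ch.isdigit():
--                 suf.append(ch)
--             else:
--                 state = 2
--                 break
--     if state == 1: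
--         return f"{''.join(pre)} {''.join(suf)}"
--     return t
-- ===== Notes on version B (the rewrite author's own statement) =====
-- stated objective: alternative
-- what changed: A locates the first digit by index, slices, and then validates prefix/suffix with two extra whole-string passes; B is a single-pass finite-state machine (letters -> digits -> reject) that accumulates the prefix and suffix lists as it goes and never slices or re-scans.
import Mathlib
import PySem

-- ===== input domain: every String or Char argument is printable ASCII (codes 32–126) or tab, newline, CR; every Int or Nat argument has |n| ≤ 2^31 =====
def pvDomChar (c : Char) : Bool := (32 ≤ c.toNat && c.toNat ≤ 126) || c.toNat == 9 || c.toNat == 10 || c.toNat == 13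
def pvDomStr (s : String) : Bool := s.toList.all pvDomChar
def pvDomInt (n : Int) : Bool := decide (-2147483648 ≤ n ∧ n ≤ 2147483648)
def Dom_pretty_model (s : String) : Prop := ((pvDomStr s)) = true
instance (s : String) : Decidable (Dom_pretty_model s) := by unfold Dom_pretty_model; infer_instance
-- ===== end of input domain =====

-- B replaces A's find-first-digit-index + slicing + two whole-string validation passes by a
-- single-pass finite-state machine accumulating prefix and suffix; objective: alternative.

-- ===== PORT A =====
-- the 'for idx, ch in enumerate(t): if ch.isdigit(): split_at = idx; break' loop
def pvFindDigitA : List Char → Nat → Option Nat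
  | [], _ => none
  | c :: cs, n => if PySem.Chars.isdigit c then some n else pvFindDigitA cs (n + 1)

def pretty_model (s : String) : String :=
  let t := PySem.Chars.strip s.toList       -- (s or "").strip(); for s = "" strip also gives ""
  if t.isEmpty then String.ofList t
  else
    match pvFindDigitA t 0 with
    | none => String.ofList t
    | some k =>
      if k == 0 then String.ofList t
      else
        let pre := PySem.List.slice t none (some (k : Int))   -- t[:split_at]
        let suf := PySem.List.slice t (some (k : Int)) none   -- t[split_at:]
        if PySem.Chars.strIsdigit suf && PySem.Chars.strIsalpha pre
        then String.ofList (pre ++ [' '] ++ suf)              -- f"{prefix} {suffix}"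
        else String.ofList t

-- ===== PORT B =====
-- the 'for ch in t' state machine: state 0 = reading letters, 1 = reading digits, 2 = rejected (break)
def pvScanB : List Char → List Char → List Char → Nat → (List Char × List Char × Nat)
  | [], pre, suf, st => (pre, suf, st)
  | c :: cs, pre, suf, st =>
    if st == 0 then
      if PySem.Chars.isalpha c then pvScanB cs (pre ++ [c]) suf 0          -- pre.append(ch)
      else if PySem.Chars.isdigit c && !pre.isEmpty then pvScanB cs pre (suf ++ [c]) 1
      else (pre, suf, 2)                                                   -- break
    else
      if PySem.Chars.isdigit c then pvScanB cs pre (suf ++ [c]) 1          -- suf.append(ch)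
      else (pre, suf, 2)                                                   -- break

def pretty_model_alt (s : String) : String :=
  let t := PySem.Chars.strip s.toList
  let r := pvScanB t [] [] 0
  if r.2.2 == 1 then String.ofList (r.1 ++ [' '] ++ r.2.1)                 -- f"{''.join(pre)} {''.join(suf)}"
  else String.ofList t

-- ===== PRECONDITION & SPEC =====
def Spec_pretty_model (s : String) (out : String) : Prop := out = pretty_model_alt s
instance (s : String) (out : String) : Decidable (Spec_pretty_model s out) := by unfold Spec_pretty_model; infer_instance

-- ===== CLAIM (what is proved, stated in full; the proofs are below) =====
def Claim_equal_pretty_model : Prop := ∀ (s : String), Dom_pretty_model s → Spec_pretty_model s (pretty_model s)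

-- ===== LEMMAS AND PROOFS =====

theorem pvDigitNotAlpha (c : Char) (h : PySem.Chars.isdigit c = true) :
    PySem.Chars.isalpha c = false := by
  simp only [PySem.Chars.isdigit, PySem.Chars.isalpha, PySem.Chars.isupper, PySem.Chars.islower,
    Char.le_def, UInt32.le_iff_toNat_le, Bool.and_eq_true, decide_eq_true_eq,
    Bool.or_eq_false_iff, Bool.and_eq_false_iff, decide_eq_false_iff_not, not_le] at *
  have h0 : '0'.val.toNat = 48 := rfl
  have h9 : '9'.val.toNat = 57 := rfl
  have hA : 'A'.val.toNat = 65 := rfl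
  have hZ : 'Z'.val.toNat = 90 := rfl
  have ha : 'a'.val.toNat = 97 := rfl
  have hz : 'z'.val.toNat = 122 := rfl
  omega

-- the length of the leading alphabetic run (proof-side characterisation, used by no port)
def pvAlphaRun : List Char → Nat
  | [] => 0
  | c :: cs => if PySem.Chars.isalpha c then pvAlphaRun cs + 1 else 0

theorem pvRun_take (t : List Char) : ∀ c ∈ t.take (pvAlphaRun t), PySem.Chars.isalpha c = true := by
  induction t with
  | nil => simp
  | cons c cs ih =>
    simp only [pvAlphaRun]
    split_ifs with h
    · intro x hx
      rw [List.take_succ_cons] at hx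
      rcases List.mem_cons.mp hx with rfl | hx
      · exact h
      · exact ih x hx
    · simp

theorem pvRun_eq (t : List Char) (k : Nat) (hk : k ≤ t.length)
    (h1 : ∀ c ∈ t.take k, PySem.Chars.isalpha c = true)
    (h2 : k < t.length → PySem.Chars.isalpha (t[k]!) = false) :
    pvAlphaRun t = k := by
  induction t generalizing k with
  | nil =>
    have : k = 0 := by simpa using hk
    simp [this, pvAlphaRun]
  | cons c cs ih =>
    cases k with
    | zero =>
      have := h2 (by simp)
      simp only [List.getElem!_cons_zero] at this
      simp [pvAlphaRun, this]
    | succ j =>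
      have hc : PySem.Chars.isalpha c = true := h1 c (by simp)
      simp only [pvAlphaRun, hc, if_true]
      have : pvAlphaRun cs = j := by
        apply ih j (by simpa using hk)
        · intro x hx; exact h1 x (by rw [List.take_succ_cons]; exact List.mem_cons_of_mem c hx)
        · intro hj
          have := h2 (by simpa using hj)
          simpa using this
      omega

theorem pvFd_some (t : List Char) (n k : Nat) (h : pvFindDigitA t n = some k) :
    ∃ j, k = n + j ∧ j < t.length ∧ PySem.Chars.isdigit (t[j]!) = true ∧
      ∀ c ∈ t.take j, PySem.Chars.isdigit c = false := by
  induction t generalizing n k with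
  | nil => simp [pvFindDigitA] at h
  | cons c cs ih =>
    simp only [pvFindDigitA] at h
    split_ifs at h with hd
    · cases h
      exact ⟨0, by omega, by simp, by simpa using hd, by simp⟩
    · obtain ⟨j, rfl, hlt, hdig, hpre⟩ := ih (n+1) k h
      refine ⟨j + 1, by omega, by simpa using hlt, by simpa using hdig, ?_⟩
      intro x hx
      rw [List.take_succ_cons] at hx
      rcases List.mem_cons.mp hx with rfl | hx
      · simpa using hd
      · exact hpre x hx

theorem pvFd_intro (t : List Char) (n j : Nat) (hj : j < t.length)
    (hd : PySem.Chars.isdigit (t[j]!) = true)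
    (hpre : ∀ c ∈ t.take j, PySem.Chars.isdigit c = false) :
    pvFindDigitA t n = some (n + j) := by
  induction t generalizing n j with
  | nil => simp at hj
  | cons c cs ih =>
    cases j with
    | zero =>
      simp only [List.getElem!_cons_zero] at hd
      simp [pvFindDigitA, hd]
    | succ j' =>
      have hc : PySem.Chars.isdigit c = false := hpre c (by simp)
      simp only [pvFindDigitA, hc, Bool.false_eq_true, if_false]
      have := ih (n+1) j' (by simpa using hj) (by simpa using hd)
        (fun x hx => hpre x (by rw [List.take_succ_cons]; exact List.mem_cons_of_mem c hx))
      rw [this]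
      congr 1
      omega


theorem pvScanB0_cons (c : Char) (cs pre suf : List Char) :
    pvScanB (c :: cs) pre suf 0 =
      if PySem.Chars.isalpha c then pvScanB cs (pre ++ [c]) suf 0
      else if PySem.Chars.isdigit c && !pre.isEmpty then pvScanB cs pre (suf ++ [c]) 1
      else (pre, suf, 2) := by
  simp [pvScanB]

theorem pvScanB1_cons (c : Char) (cs pre suf : List Char) :
    pvScanB (c :: cs) pre suf 1 =
      if PySem.Chars.isdigit c then pvScanB cs pre (suf ++ [c]) 1
      else (pre, suf, 2) := by
  simp [pvScanB]

-- state 1 consumes digits: if all of t is digits it ends in state 1 appending t to suf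
theorem pvScan1_eq (t : List Char) : ∀ suf pre, (∀ c ∈ t, PySem.Chars.isdigit c = true) →
    pvScanB t pre suf 1 = (pre, suf ++ t, 1) := by
  induction t with
  | nil => intro suf pre _; simp [pvScanB]
  | cons c cs ih =>
    intro suf pre h
    rw [pvScanB1_cons, if_pos (h c (by simp)),
      ih (suf ++ [c]) pre (fun x hx => h x (List.mem_cons_of_mem c hx))]
    simp

-- state 1 ends in state 1 only if every remaining char is a digit
theorem pvScan1_digits (t : List Char) : ∀ suf pre, (pvScanB t pre suf 1).2.2 = 1 →
    ∀ c ∈ t, PySem.Chars.isdigit c = true := by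
  induction t with
  | nil => simp
  | cons c cs ih =>
    intro suf pre h
    rw [pvScanB1_cons] at h
    split_ifs at h with hc
    · intro x hx
      rcases List.mem_cons.mp hx with rfl | hx
      · exact hc
      · exact ih (suf ++ [c]) pre h x hx
    · simp at h

-- starting in state 0 on alpha-run ++ digit-run the machine accepts with exactly that split
theorem pvScan0_pos (a : List Char) : ∀ (d pre : List Char),
    (∀ c ∈ a, PySem.Chars.isalpha c = true) → d ≠ [] →
    (∀ c ∈ d, PySem.Chars.isdigit c = true) → pre ++ a ≠ [] →
    pvScanB (a ++ d) pre [] 0 = (pre ++ a, d, 1) := by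
  induction a with
  | nil =>
    intro d pre _ hd0 hd hp
    rcases d with _ | ⟨c, cs⟩
    · exact absurd rfl hd0
    · have hc := hd c (by simp)
      have hca := pvDigitNotAlpha c hc
      have hpne : pre ≠ [] := by simpa using hp
      rw [List.nil_append, pvScanB0_cons, if_neg (by simp [hca]),
        if_pos (by simp [hc, hpne]), List.nil_append,
        pvScan1_eq cs [c] pre (fun x hx => hd x (List.mem_cons_of_mem c hx))]
      simp
  | cons x a' ih =>
    intro d pre ha hd0 hd _
    have hx := ha x (by simp)
    rw [List.cons_append, pvScanB0_cons, if_pos hx,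
      ih d (pre ++ [x]) (fun c hc => ha c (List.mem_cons_of_mem x hc)) hd0 hd (by simp)]
    simp

-- the machine accepts only strings of the shape alpha-run ++ nonempty digit-run
theorem pvScan0_inv (t : List Char) : ∀ pre, (pvScanB t pre [] 0).2.2 = 1 →
    ∃ a d, t = a ++ d ∧ (∀ c ∈ a, PySem.Chars.isalpha c = true) ∧ d ≠ [] ∧
      (∀ c ∈ d, PySem.Chars.isdigit c = true) ∧ pre ++ a ≠ [] := by
  induction t with
  | nil => intro pre h; simp [pvScanB] at h
  | cons c cs ih =>
    intro pre h
    rw [pvScanB0_cons] at h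
    split_ifs at h with h1 h2
    · obtain ⟨a, d, rfl, ha', hd0, hd, hp⟩ := ih (pre ++ [c]) h
      refine ⟨c :: a, d, by simp, ?_, hd0, hd, by simp⟩
      intro x hx
      rcases List.mem_cons.mp hx with rfl | hx
      · exact h1
      · exact ha' x hx
    · rcases (Bool.and_eq_true _ _).mp h2 with ⟨hc1, hc2⟩
      have hcs := pvScan1_digits cs ([] ++ [c]) pre h
      have hpre : pre ≠ [] := by intro he; rw [he] at hc2; simp at hc2
      refine ⟨[], c :: cs, by simp, by simp, by simp, ?_, by simpa using hpre⟩
      intro x hx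
      rcases List.mem_cons.mp hx with rfl | hx
      · exact hc1
      · exact hcs x hx
    · simp at h

theorem pvDropGet (t : List Char) (i : Nat) (hi : i < t.length) :
    (t.drop i) ≠ [] ∧ t[i]! = (t.drop i)[0]! ∧ t[i]! ∈ t.drop i := by
  have hlen : 0 < (t.drop i).length := by simpa using hi
  have hne : t.drop i ≠ [] := List.ne_nil_of_length_pos hlen
  have hgi : t[i]! = (t.drop i)[0]! := by
    rw [getElem!_pos t i hi, getElem!_pos (t.drop i) 0 hlen]
    simp
  refine ⟨hne, hgi, ?_⟩
  rw [hgi, getElem!_pos (t.drop i) 0 hlen]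
  exact List.getElem_mem _

theorem pvCore (t : List Char) :
    (if t.isEmpty then String.ofList t
     else match pvFindDigitA t 0 with
       | none => String.ofList t
       | some k =>
         if k == 0 then String.ofList t
         else
           let pre := PySem.List.slice t none (some (k : Int))
           let suf := PySem.List.slice t (some (k : Int)) none
           if PySem.Chars.strIsdigit suf && PySem.Chars.strIsalpha pre
           then String.ofList (pre ++ [' '] ++ suf)
           else String.ofList t) =
    (let r := pvScanB t [] [] 0
     if r.2.2 == 1 then String.ofList (r.1 ++ [' '] ++ r.2.1)
     else String.ofList t) := by
  simp only [PySem.List.slice_to_natCast, PySem.List.slice_from_natCast]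
  by_cases hQ : 0 < pvAlphaRun t ∧ pvAlphaRun t < t.length ∧
      (∀ c ∈ t.drop (pvAlphaRun t), PySem.Chars.isdigit c = true)
  · -- accepted shape: both sides split at the alpha-run boundary
    obtain ⟨hi0, hilt, hdig⟩ := hQ
    set i := pvAlphaRun t with hi
    obtain ⟨hdne, hgi, hmem⟩ := pvDropGet t i hilt
    have hdigi : PySem.Chars.isdigit (t[i]!) = true := hdig _ hmem
    have hprei : ∀ c ∈ t.take i, PySem.Chars.isdigit c = false := by
      intro x hx
      have hxa := pvRun_take t x (by rwa [← hi])
      by_contra hxd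
      have := pvDigitNotAlpha x (Bool.of_not_eq_false hxd)
      rw [this] at hxa; exact Bool.false_ne_true hxa
    have hfd : pvFindDigitA t 0 = some i := by simpa using pvFd_intro t 0 i hilt hdigi hprei
    have hnil : t ≠ [] := by intro h; rw [h] at hilt; simp at hilt
    rw [if_neg (by simpa using hnil), hfd]
    simp only []
    rw [if_neg (show ¬((i == 0) = true) by simp; omega)]
    have hcond : (PySem.Chars.strIsdigit (t.drop i) && PySem.Chars.strIsalpha (t.take i)) = true := by
      refine (Bool.and_eq_true _ _).mpr ⟨?_, ?_⟩
      · simp only [PySem.Chars.strIsdigit, Bool.and_eq_true, List.all_eq_true]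
        exact ⟨by simpa using hdne, hdig⟩
      · simp only [PySem.Chars.strIsalpha, Bool.and_eq_true, List.all_eq_true]
        refine ⟨?_, fun x hx => pvRun_take t x (by rwa [← hi])⟩
        have : t.take i ≠ [] := by simp [List.take_eq_nil_iff, hnil]; omega
        simpa using this
    rw [if_pos hcond]
    have hscan : pvScanB t [] [] 0 = (t.take i, t.drop i, 1) := by
      have := pvScan0_pos (t.take i) (t.drop i) []
        (fun x hx => pvRun_take t x (by rwa [← hi])) hdne hdig
        (by simp [List.take_eq_nil_iff, hnil]; omega)
      simpa using this
    simp [hscan]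
  · -- rejected shape: both sides return t unchanged
    have hB : (pvScanB t [] [] 0).2.2 ≠ 1 := by
      intro h1
      obtain ⟨a, d, rfl, ha, hd0, hd, hp⟩ := pvScan0_inv _ [] h1
      have hane : a ≠ [] := by simpa using hp
      have hrun : pvAlphaRun (a ++ d) = a.length := by
        apply pvRun_eq _ _ (by simp)
        · intro x hx
          rw [List.take_append_of_le_length (le_refl _)] at hx
          exact ha x (by simpa using hx)
        · intro hlt
          obtain ⟨hdne, hgi, hmem⟩ := pvDropGet (a ++ d) a.length hlt
          rw [List.drop_left] at hmem
          exact pvDigitNotAlpha _ (hd _ hmem)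
      apply hQ
      have hd0' := List.length_pos_of_ne_nil hd0
      refine ⟨?_, ?_, ?_⟩
      · rw [hrun]; exact List.length_pos_of_ne_nil hane
      · rw [hrun]; simp only [List.length_append]; omega
      · rw [hrun, List.drop_left]; exact hd
    conv_rhs => rw [if_neg (show ¬(((pvScanB t [] [] 0).2.2 == 1) = true) by simpa using hB)]
    by_cases hnil : t = []
    · subst hnil; simp
    · rw [if_neg (by simpa using hnil)]
      rcases hfd : pvFindDigitA t 0 with _ | k
      · rfl
      · simp only []
        by_cases hk0 : k = 0
        · simp [hk0]
        · rw [if_neg (show ¬((k == 0) = true) by simpa using hk0)]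
          rw [if_neg ?hc]
          case hc =>
            intro hcond
            have hsd := (Bool.and_eq_true _ _).mp hcond
            obtain ⟨j, hj0, hjlt, hjd, hjpre⟩ := pvFd_some t 0 k hfd
            have hkj : k = j := by omega
            subst hkj
            have hrun : pvAlphaRun t = k := by
              apply pvRun_eq t k (by omega)
              · intro x hx
                have halpha := hsd.2
                simp only [PySem.Chars.strIsalpha, Bool.and_eq_true, List.all_eq_true] at halpha
                exact halpha.2 x hx
              · intro _; exact pvDigitNotAlpha _ hjd
            apply hQ
            refine ⟨by omega, by omega, ?_⟩
            rw [hrun]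
            have hdd := hsd.1
            simp only [PySem.Chars.strIsdigit, Bool.and_eq_true, List.all_eq_true] at hdd
            exact hdd.2

-- ===== VERDICT (by name: the statement is the Claim_ definition above) =====
theorem pretty_model_spec : Claim_equal_pretty_model := by
  intro s _
  unfold Spec_pretty_model pretty_model pretty_model_alt
  exact pvCore (PySem.Chars.strip s.toList)
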